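-- pv_equiv track=rewrite | github.com/y453n007/Python-for-Data-Science | I - Starting/ex05/building.py | get_text_specification
-- ===== SOURCE A (Python) =====
-- def get_text_specification(text: str) -> str:
--     """Counting the sums of the text upper-case characters, lower-case
--     characters, punctuation characters, digits and spaces `str`.
--
--     :param text: str - a single string argument.
--     :return: str - containing the specification.
--
--     expected lines:
--         '
--             The text contains 'n' characters:
--             'n' upper letters
--             'n' lower letters
--             'n' punctuation marks
--             'n' spaces
--             'n' digits
--         '
--     """
--
--     upper = lower = digit = space = punct = chara = 0
--
--     # punctuation marks list
--     punctuation_marks = [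
--         '!', '"', '#', '$', '%', '&', "'", '(', ')', '*', '+',
--         ',', '-', '.', '/', ':', ';', '<', '=', '>', '?', '@',
--         '[', '\\', ']', '^', '_', '`', '{', '|', '}', '~'
--     ]
--
--     for char in text:
--         chara += 1
--         if char.isupper():
--             upper += 1
--         elif char.islower():
--             lower += 1
--         elif char.isdigit():
--             digit += 1
--         elif char.isspace():
--             space += 1
--         elif char in punctuation_marks:
--             punct += 1
--
--     return (
--         f"The text contains {chara} characters:\n" +
--         f"{upper} upper letters\n" +
--         f"{lower} lower letters\n" +
--         f"{punct} punctuation marks\n" +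
--         f"{space} spaces\n" +
--         f"{digit} digits\n"
--     )
-- ===== SOURCE B (Python) =====
-- def get_text_specification(text: str) -> str:
--     """Same specification string, computed with independent passes:
--     one count per category (the categories are mutually exclusive)."""
--     marks = set('!"#$%&\'()*+,-./:;<=>?@[\\]^_`{|}~')
--     chara = len(text)
--     upper = sum(1 for c in text if c.isupper())
--     lower = sum(1 for c in text if c.islower())
--     digit = sum(1 for c in text if c.isdigit())
--     space = sum(1 for c in text if c.isspace())
--     punct = sum(1 for c in text if c in marks)
--     return (
--         f"The text contains {chara} characters:\n" +
--         f"{upper} upper letters\n" +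
--         f"{lower} lower letters\n" +
--         f"{punct} punctuation marks\n" +
--         f"{space} spaces\n" +
--         f"{digit} digits\n"
--     )
-- ===== Notes on version B (the rewrite author's own statement) =====
-- stated objective: simpler
-- what changed: Replaces the single accumulating loop with a six-counter elif priority chain by len() plus five independent category counts (one generator-sum per predicate, punctuation via a set), relying on the categories being mutually exclusive on ASCII so the elif priority is irrelevant.
import Mathlib
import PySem

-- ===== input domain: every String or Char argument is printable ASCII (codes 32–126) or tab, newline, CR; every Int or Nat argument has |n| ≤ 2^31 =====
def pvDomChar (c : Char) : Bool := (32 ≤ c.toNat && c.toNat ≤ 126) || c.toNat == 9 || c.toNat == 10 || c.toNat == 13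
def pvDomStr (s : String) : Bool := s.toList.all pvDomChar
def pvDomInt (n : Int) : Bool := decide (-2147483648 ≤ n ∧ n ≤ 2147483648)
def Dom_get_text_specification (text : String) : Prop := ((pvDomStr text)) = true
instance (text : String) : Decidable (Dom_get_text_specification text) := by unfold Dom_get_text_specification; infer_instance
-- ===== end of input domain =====

-- B replaces A's single six-counter elif-priority loop by len() plus five independent
-- per-category counting passes (objective: simpler; same O(n) cost).


-- ===== PORT A =====
-- A's punctuation_marks list, in A's order
def pvPunctA : List Char :=
  ['!', '"', '#', '$', '%', '&', '\'', '(', ')', '*', '+',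
   ',', '-', '.', '/', ':', ';', '<', '=', '>', '?', '@',
   '[', '\\', ']', '^', '_', '`', '{', '|', '}', '~']

-- the loop body: one step over the 6-tuple (upper, lower, digit, space, punct, chara)
def pvStepA (st : Int × Int × Int × Int × Int × Int) (char : Char) :
    Int × Int × Int × Int × Int × Int :=
  let (upper, lower, digit, space, punct, chara) := st
  let chara := chara + 1
  if PySem.Chars.isupper char then (upper + 1, lower, digit, space, punct, chara)
  else if PySem.Chars.islower char then (upper, lower + 1, digit, space, punct, chara)
  else if PySem.Chars.isdigit char then (upper, lower, digit + 1, space, punct, chara)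
  else if PySem.Chars.isspace char then (upper, lower, digit, space + 1, punct, chara)
  else if pvPunctA.contains char then (upper, lower, digit, space, punct + 1, chara)
  else (upper, lower, digit, space, punct, chara)

def get_text_specification (text : String) : String :=
  let st := text.toList.foldl pvStepA (0, 0, 0, 0, 0, 0)
  let (upper, lower, digit, space, punct, chara) := st
  "The text contains " ++ PySem.Int.toStr chara ++ " characters:\n" ++
  PySem.Int.toStr upper ++ " upper letters\n" ++
  PySem.Int.toStr lower ++ " lower letters\n" ++
  PySem.Int.toStr punct ++ " punctuation marks\n" ++
  PySem.Int.toStr space ++ " spaces\n" ++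
  PySem.Int.toStr digit ++ " digits\n"

-- ===== PORT B =====
-- B's marks = set('!"#$%&\'()*+,-./:;<=>?@[\]^_`{|}~')
def pvMarksB : PySem.Set Char :=
  PySem.Set.ofList "!\"#$%&'()*+,-./:;<=>?@[\\]^_`{|}~".toList

def get_text_specification_alt (text : String) : String :=
  let cs := text.toList
  let chara : Int := cs.length
  let upper : Int := cs.countP (fun c => PySem.Chars.isupper c)
  let lower : Int := cs.countP (fun c => PySem.Chars.islower c)
  let digit : Int := cs.countP (fun c => PySem.Chars.isdigit c)
  let space : Int := cs.countP (fun c => PySem.Chars.isspace c)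
  let punct : Int := cs.countP (fun c => PySem.Set.contains pvMarksB c)
  "The text contains " ++ PySem.Int.toStr chara ++ " characters:\n" ++
  PySem.Int.toStr upper ++ " upper letters\n" ++
  PySem.Int.toStr lower ++ " lower letters\n" ++
  PySem.Int.toStr punct ++ " punctuation marks\n" ++
  PySem.Int.toStr space ++ " spaces\n" ++
  PySem.Int.toStr digit ++ " digits\n"

-- ===== PRECONDITION & SPEC =====
def Spec_get_text_specification (text : String) (out : String) : Prop := out = get_text_specification_alt text
instance (text : String) (out : String) : Decidable (Spec_get_text_specification text out) := by unfold Spec_get_text_specification; infer_instance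

-- ===== CLAIM (what is proved, stated in full; the proofs are below) =====
def Claim_equal_get_text_specification : Prop := ∀ (text : String), Dom_get_text_specification text → Spec_get_text_specification text (get_text_specification text)

-- ===== LEMMAS AND PROOFS =====

-- the effective predicates of A's elif chain
def pvQL (c : Char) : Bool := !PySem.Chars.isupper c && PySem.Chars.islower c
def pvQD (c : Char) : Bool := !PySem.Chars.isupper c && !PySem.Chars.islower c && PySem.Chars.isdigit c
def pvQS (c : Char) : Bool := !PySem.Chars.isupper c && !PySem.Chars.islower c && !PySem.Chars.isdigit c && PySem.Chars.isspace c
def pvQP (c : Char) : Bool := !PySem.Chars.isupper c && !PySem.Chars.islower c && !PySem.Chars.isdigit c && !PySem.Chars.isspace c && pvPunctA.contains c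

theorem pvMarksB_eq : pvMarksB = pvPunctA := by decide

theorem pvFoldA_eq (cs : List Char) (u l d s p n : Int) :
    cs.foldl pvStepA (u, l, d, s, p, n) =
      (u + cs.countP (fun c => PySem.Chars.isupper c),
       l + cs.countP pvQL, d + cs.countP pvQD,
       s + cs.countP pvQS, p + cs.countP pvQP, n + cs.length) := by
  induction cs generalizing u l d s p n with
  | nil => simp
  | cons c cs ih =>
    simp only [List.foldl_cons, List.countP_cons, List.length_cons, pvStepA,
      pvQL, pvQD, pvQS, pvQP, List.contains_eq_mem]
    by_cases hU : PySem.Chars.isupper c <;>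
      by_cases hL : PySem.Chars.islower c <;>
        by_cases hD : PySem.Chars.isdigit c <;>
          by_cases hS : PySem.Chars.isspace c <;>
            by_cases hP : c ∈ pvPunctA <;>
              simp [hU, hL, hD, hS, hP, ih] <;> omega

-- pointwise mutual exclusion of the categories
theorem pvUL (c : Char) (h : PySem.Chars.isupper c = true) : PySem.Chars.islower c = false := by
  cases h2 : PySem.Chars.islower c
  · rfl
  · exfalso; revert h h2
    simp only [PySem.Chars.isupper, PySem.Chars.islower, Bool.and_eq_true, decide_eq_true_eq,
      Char.le_def, UInt32.le_iff_toNat_le, Char.reduceVal, UInt32.reduceToNat]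
    omega

theorem pvUD (c : Char) (h : PySem.Chars.isupper c = true) : PySem.Chars.isdigit c = false := by
  cases h2 : PySem.Chars.isdigit c
  · rfl
  · exfalso; revert h h2
    simp only [PySem.Chars.isupper, PySem.Chars.isdigit, Bool.and_eq_true, decide_eq_true_eq,
      Char.le_def, UInt32.le_iff_toNat_le, Char.reduceVal, UInt32.reduceToNat]
    omega

theorem pvLD (c : Char) (h : PySem.Chars.islower c = true) : PySem.Chars.isdigit c = false := by
  cases h2 : PySem.Chars.isdigit c
  · rfl
  · exfalso; revert h h2
    simp only [PySem.Chars.islower, PySem.Chars.isdigit, Bool.and_eq_true, decide_eq_true_eq,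
      Char.le_def, UInt32.le_iff_toNat_le, Char.reduceVal, UInt32.reduceToNat]
    omega

theorem pvUS (c : Char) (h : PySem.Chars.isupper c = true) : PySem.Chars.isspace c = false := by
  cases h2 : PySem.Chars.isspace c
  · rfl
  · exfalso; revert h h2
    simp only [PySem.Chars.isupper, PySem.Chars.isspace, Bool.and_eq_true, Bool.or_eq_true,
      decide_eq_true_eq, Char.le_def, UInt32.le_iff_toNat_le, Char.reduceVal, UInt32.reduceToNat,
      Char.toNat]
    omega

theorem pvLS (c : Char) (h : PySem.Chars.islower c = true) : PySem.Chars.isspace c = false := by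
  cases h2 : PySem.Chars.isspace c
  · rfl
  · exfalso; revert h h2
    simp only [PySem.Chars.islower, PySem.Chars.isspace, Bool.and_eq_true, Bool.or_eq_true,
      decide_eq_true_eq, Char.le_def, UInt32.le_iff_toNat_le, Char.reduceVal, UInt32.reduceToNat,
      Char.toNat]
    omega

theorem pvDS (c : Char) (h : PySem.Chars.isdigit c = true) : PySem.Chars.isspace c = false := by
  cases h2 : PySem.Chars.isspace c
  · rfl
  · exfalso; revert h h2
    simp only [PySem.Chars.isdigit, PySem.Chars.isspace, Bool.and_eq_true, Bool.or_eq_true,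
      decide_eq_true_eq, Char.le_def, UInt32.le_iff_toNat_le, Char.reduceVal, UInt32.reduceToNat,
      Char.toNat]
    omega

-- so the elif guards simplify away
theorem pvQL_eq : pvQL = fun c => PySem.Chars.islower c := by
  funext c
  cases hU : PySem.Chars.isupper c
  · simp [pvQL, hU]
  · simp [pvQL, hU, pvUL c hU]

theorem pvQD_eq : pvQD = fun c => PySem.Chars.isdigit c := by
  funext c
  cases hU : PySem.Chars.isupper c
  · cases hL : PySem.Chars.islower c
    · simp [pvQD, hU, hL]
    · simp [pvQD, hU, hL, pvLD c hL]
  · simp [pvQD, hU, pvUD c hU]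

theorem pvQS_eq : pvQS = fun c => PySem.Chars.isspace c := by
  funext c
  cases hU : PySem.Chars.isupper c
  · cases hL : PySem.Chars.islower c
    · cases hD : PySem.Chars.isdigit c
      · simp [pvQS, hU, hL, hD]
      · simp [pvQS, hU, hL, hD, pvDS c hD]
    · simp [pvQS, hU, hL, pvLS c hL]
  · simp [pvQS, hU, pvUS c hU]

theorem pvQP_eq : pvQP = fun c => PySem.Set.contains pvMarksB c := by
  funext c
  by_cases h : c ∈ pvPunctA
  · fin_cases h <;> decide
  · simp [pvQP, PySem.Set.contains, pvMarksB_eq, h]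

-- ===== VERDICT (by name: the statement is the Claim_ definition above) =====
theorem get_text_specification_spec : Claim_equal_get_text_specification := by
  intro text _
  show _ = _
  simp [get_text_specification, get_text_specification_alt, pvFoldA_eq,
    pvQL_eq, pvQD_eq, pvQS_eq, pvQP_eq, PySem.Set.contains]
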